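-- pv_equiv track=rewrite | github.com/MaarksN/SAAS-360-CORRE-O | scripts/forensics/generate_governance_inventory.py | first_heading
-- ===== SOURCE A (Python) =====
-- def first_non_empty_line(text: str) -> str:
--     for line in text.splitlines():
--         stripped = line.strip()
--         if stripped:
--             return stripped
--     return ""
--
-- def first_heading(text: str) -> str:
--     for line in text.splitlines():
--         stripped = line.strip()
--         if stripped.startswith("#"):
--             return stripped.lstrip("#").strip()
--         if stripped.startswith("title:"):
--             return stripped
--         if stripped.startswith("name:"):
--             return stripped
--         if stripped.startswith("description:"):
--             return stripped
--     return first_non_empty_line(text)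
-- ===== SOURCE B (Python) =====
-- def first_heading(text: str) -> str:
--     fallback = ""
--     for raw in text.splitlines():
--         line = raw.strip()
--         if line.startswith("#"):
--             return line.lstrip("#").strip()
--         if line.startswith(("title:", "name:", "description:")):
--             return line
--         if not fallback:
--             fallback = line
--     return fallback
-- ===== Notes on version B (the rewrite author's own statement) =====
-- stated objective: simpler
-- what changed: Merged A's two passes (heading scan, then a full rescan for the first non-empty line) into one pass that keeps the first non-empty stripped line in an accumulator and returns it after the loop.
import Mathlib
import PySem

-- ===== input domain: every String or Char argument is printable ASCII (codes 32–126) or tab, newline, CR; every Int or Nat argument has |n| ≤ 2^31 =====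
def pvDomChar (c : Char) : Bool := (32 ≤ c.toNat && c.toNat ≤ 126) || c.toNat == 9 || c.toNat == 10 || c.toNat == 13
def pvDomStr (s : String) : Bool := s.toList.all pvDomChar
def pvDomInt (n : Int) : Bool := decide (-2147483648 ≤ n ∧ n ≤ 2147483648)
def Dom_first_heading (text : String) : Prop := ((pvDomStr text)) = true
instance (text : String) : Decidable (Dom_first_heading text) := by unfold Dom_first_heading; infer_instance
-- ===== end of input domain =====

-- B merges A's two passes (heading scan + first-non-empty rescan) into one pass with an accumulator; return values agree on all inputs.

-- s.lstrip("#") — hand port (PySem has no one-sided stripChars): drop leading '#' characters; exact.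
def lstripHash (s : String) : String := String.ofList (s.toList.dropWhile (· == '#'))

-- ===== PORT A =====
def fnelLoop : List String → String
  | [] => ""
  | l :: ls =>
    let stripped := PySem.Str.strip l
    if stripped ≠ "" then stripped else fnelLoop ls

def first_non_empty_line (text : String) : String := fnelLoop (PySem.Str.splitlines text)

def headingLoop : List String → Option String
  | [] => none
  | l :: ls =>
    let stripped := PySem.Str.strip l
    if PySem.Str.startswith stripped "#" then some (PySem.Str.strip (lstripHash stripped))
    else if PySem.Str.startswith stripped "title:" then some stripped
    else if PySem.Str.startswith stripped "name:" then some stripped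
    else if PySem.Str.startswith stripped "description:" then some stripped
    else headingLoop ls

def first_heading (text : String) : String :=
  match headingLoop (PySem.Str.splitlines text) with
  | some r => r
  | none => first_non_empty_line text

-- ===== PORT B =====
def altLoop (fallback : String) : List String → String
  | [] => fallback
  | raw :: ls =>
    let line := PySem.Str.strip raw
    if PySem.Str.startswith line "#" then PySem.Str.strip (lstripHash line)
    else if PySem.Str.startswith line "title:" || PySem.Str.startswith line "name:"
            || PySem.Str.startswith line "description:" then line
    else altLoop (if fallback = "" then line else fallback) ls

def first_heading_alt (text : String) : String := altLoop "" (PySem.Str.splitlines text)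

-- ===== PRECONDITION & SPEC =====
def Spec_first_heading (text : String) (out : String) : Prop := out = first_heading_alt text
instance (text : String) (out : String) : Decidable (Spec_first_heading text out) := by unfold Spec_first_heading; infer_instance

-- ===== CLAIM (what is proved, stated in full; the proofs are below) =====
def Claim_equal_first_heading : Prop := ∀ (text : String), Dom_first_heading text → Spec_first_heading text (first_heading text)

-- ===== LEMMAS AND PROOFS =====
lemma altLoop_eq (ls : List String) : ∀ fb : String,
    altLoop fb ls = match headingLoop ls with
      | some r => r
      | none => if fb = "" then fnelLoop ls else fb := by
  induction ls with
  | nil =>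
    intro fb
    simp only [altLoop, headingLoop, fnelLoop]
    by_cases h : fb = "" <;> simp [h]
  | cons l ls ih =>
    intro fb
    simp only [altLoop, headingLoop, fnelLoop]
    by_cases h1 : PySem.Chars.startswith (PySem.Chars.strip l.toList) ['#'] = true
    · simp [h1]
    · by_cases h2 : PySem.Chars.startswith (PySem.Chars.strip l.toList) ['t','i','t','l','e',':'] = true
      · simp [h1, h2]
      · by_cases h3 : PySem.Chars.startswith (PySem.Chars.strip l.toList) ['n','a','m','e',':'] = true
        · simp [h1, h2, h3]
        · by_cases h4 : PySem.Chars.startswith (PySem.Chars.strip l.toList) ['d','e','s','c','r','i','p','t','i','o','n',':'] = true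
          · simp [h1, h2, h3, h4]
          · rw [ih]
            simp only [PySem.Chars.startswith_iff] at h1 h2 h3 h4
            by_cases hfb : fb = ""
            · by_cases hs : PySem.Str.strip l = ""
              · cases hh : headingLoop ls <;> simp [h1, h2, h3, h4, hfb, hs, hh, PySem.Chars.startswith_iff]
              · cases hh : headingLoop ls <;> simp [h1, h2, h3, h4, hfb, hs, hh, PySem.Chars.startswith_iff]
            · cases hh : headingLoop ls <;> simp [h1, h2, h3, h4, hfb, hh, PySem.Chars.startswith_iff]

-- ===== VERDICT (by name: the statement is the Claim_ definition above) =====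
theorem first_heading_spec : Claim_equal_first_heading := by
  intro text _
  unfold Spec_first_heading first_heading first_heading_alt first_non_empty_line
  rw [altLoop_eq]
  cases hh : headingLoop (PySem.Str.splitlines text) <;> simp [hh]
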